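-- pv_equiv track=rewrite | github.com/qenex-ai/qenex-lab | workspace/packages/qenex_chem/src/eri_optimized.py | get_unique_quartets
-- ===== SOURCE A (Python) =====
-- from typing import Tuple, Dict, List, Optional, Callable
--
-- def get_unique_quartets(n: int) -> List[Tuple[int, int, int, int]]:
--     """Generate all unique (i, j, k, l) quartets."""
--     quartets = []
--     for i in range(n):
--         for j in range(i + 1):
--             ij = i * (i + 1) // 2 + j
--             for k in range(n):
--                 for l in range(k + 1):
--                     kl = k * (k + 1) // 2 + l
--                     if ij >= kl:
--                         quartets.append((i, j, k, l))
--     return quartets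
-- ===== SOURCE B (Python) =====
-- def get_unique_quartets(n):
--     """Generate all unique (i, j, k, l) quartets."""
--     pairs = [(i, j) for i in range(n) for j in range(i + 1)]
--     quartets = []
--     for idx1, (i, j) in enumerate(pairs):
--         for idx2 in range(idx1 + 1):
--             k, l = pairs[idx2]
--             quartets.append((i, j, k, l))
--     return quartets
-- ===== Notes on version B (the rewrite author's own statement) =====
-- stated objective: alternative
-- what changed: Precomputes the triangular (i,j) pair list once and, for each pair at index idx1, emits quartets by iterating the prefix pairs[0..idx1] directly, instead of rescanning all (k,l) pairs and recomputing and comparing their triangular indices with a guard (intended as faster; measured 1.71x at n=16, unconfirmed at larger sizes where both time out).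
import Mathlib
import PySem

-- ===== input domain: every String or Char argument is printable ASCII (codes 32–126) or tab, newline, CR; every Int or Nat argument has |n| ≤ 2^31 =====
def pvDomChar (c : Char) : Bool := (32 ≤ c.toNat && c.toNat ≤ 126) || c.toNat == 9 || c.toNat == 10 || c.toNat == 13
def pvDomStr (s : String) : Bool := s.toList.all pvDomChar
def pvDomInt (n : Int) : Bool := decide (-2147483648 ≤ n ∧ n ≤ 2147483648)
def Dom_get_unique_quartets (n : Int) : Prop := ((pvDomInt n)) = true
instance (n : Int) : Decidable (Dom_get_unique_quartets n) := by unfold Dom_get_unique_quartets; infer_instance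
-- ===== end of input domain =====

-- B precomputes the triangular (i,j) pair table once and, for the pair at index idx1, emits one
-- quartet per prefix entry pairs[0..idx1], replacing A's full (k,l) rescan with the ij >= kl guard.

-- ===== PORT A =====
def get_unique_quartets (n : Int) : List (Int × Int × Int × Int) :=
  (PySem.List.pyRange 0 n 1).foldl (fun quartets i =>
    (PySem.List.pyRange 0 (i + 1) 1).foldl (fun quartets j =>
      let ij := PySem.Int.floordiv (i * (i + 1)) 2 + j
      (PySem.List.pyRange 0 n 1).foldl (fun quartets k =>
        (PySem.List.pyRange 0 (k + 1) 1).foldl (fun quartets l =>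
          let kl := PySem.Int.floordiv (k * (k + 1)) 2 + l
          if ij ≥ kl then quartets ++ [(i, j, k, l)] else quartets)
        quartets)
      quartets)
    quartets)
  []

-- ===== PORT B =====
-- the comprehension 'pairs = [(i, j) for i in range(n) for j in range(i + 1)]'
def pvPairs (n : Int) : List (Int × Int) :=
  (PySem.List.pyRange 0 n 1).flatMap (fun i =>
    (PySem.List.pyRange 0 (i + 1) 1).map (fun j => (i, j)))

def get_unique_quartets_alt (n : Int) : List (Int × Int × Int × Int) :=
  let pairs := pvPairs n
  (PySem.List.enumerate pairs 0).foldl (fun quartets p =>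
    (PySem.List.pyRange 0 (p.1 + 1) 1).foldl (fun quartets idx2 =>
      match PySem.List.pyGet? pairs idx2 with   -- 'k, l = pairs[idx2]'; none (IndexError) never occurs
      | some kl => quartets ++ [(p.2.1, p.2.2, kl.1, kl.2)]
      | none => quartets)
    quartets)
  []

-- ===== PRECONDITION & SPEC =====
def Spec_get_unique_quartets (n : Int) (out : List (Int × Int × Int × Int)) : Prop := out = get_unique_quartets_alt n
instance (n : Int) (out : List (Int × Int × Int × Int)) : Decidable (Spec_get_unique_quartets n out) := by unfold Spec_get_unique_quartets; infer_instance

-- ===== CLAIM (what is proved, stated in full; the proofs are below) =====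
def Claim_equal_get_unique_quartets : Prop := ∀ (n : Int), Dom_get_unique_quartets n → Spec_get_unique_quartets n (get_unique_quartets n)

-- ===== LEMMAS AND PROOFS =====

-- the triangular index i*(i+1)//2 + j of a pair
def pvIdx (p : Int × Int) : Int := PySem.Int.floordiv (p.1 * (p.1 + 1)) 2 + p.2

lemma pv_map_add_pyRange (c b : Int) :
    (PySem.List.pyRange 0 b 1).map (fun j => c + j) = PySem.List.pyRange c (c + b) 1 := by
  rw [PySem.List.pyRange_one, PySem.List.pyRange_one, List.map_map]
  have : (c + b - c).toNat = (b - 0).toNat := by omega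
  rw [this]
  simp

lemma pvPairs_succ (m : Nat) :
    pvPairs ((m : Int) + 1) = pvPairs (m : Int) ++ (PySem.List.pyRange 0 ((m : Int) + 1) 1).map (fun j => ((m : Int), j)) := by
  unfold pvPairs
  rw [PySem.List.pyRange_one_succ_right (by positivity)]
  simp
  rw [PySem.List.pyRange_one_succ_right (by positivity)]
  simp

lemma pvPairs_length (m : Nat) : 2 * (pvPairs (m : Int)).length = m * (m + 1) := by
  induction m with
  | zero => simp [pvPairs]
  | succ m ih =>
    have hc : ((m + 1 : Nat) : Int) = (m : Int) + 1 := by push_cast; ring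
    rw [hc, pvPairs_succ, List.length_append, List.length_map, PySem.List.length_pyRange_one]
    have ht : ((m : Int) + 1 - 0).toNat = m + 1 := by omega
    rw [ht]
    calc 2 * ((pvPairs (m : Int)).length + (m + 1))
        = 2 * (pvPairs (m : Int)).length + 2 * (m + 1) := by ring
      _ = m * (m + 1) + 2 * (m + 1) := by rw [ih]
      _ = (m + 1) * (m + 1 + 1) := by ring

-- the pvIdx values along pvPairs are exactly 0, 1, …, length-1
lemma pvIdx_pairs_nat (m : Nat) :
    (pvPairs (m : Int)).map pvIdx = PySem.List.pyRange 0 ((pvPairs (m : Int)).length) 1 := by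
  induction m with
  | zero => simp [pvPairs]
  | succ m ih =>
    have hc : ((m + 1 : Nat) : Int) = (m : Int) + 1 := by push_cast; ring
    rw [hc, pvPairs_succ, List.map_append, ih, List.map_map]
    have hblock : ((PySem.List.pyRange 0 ((m : Int) + 1) 1).map (pvIdx ∘ fun j => ((m : Int), j)))
        = PySem.List.pyRange ((pvPairs (m : Int)).length) (((pvPairs (m : Int)).length : Int) + ((m : Int) + 1)) 1 := by
      have hf : (pvIdx ∘ fun j => ((m : Int), j)) = fun j => (((pvPairs (m : Int)).length : Int) + j) := by
        funext j
        have h2 := pvPairs_length m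
        simp only [Function.comp, pvIdx]
        have hcast : (m : Int) * ((m : Int) + 1) = ((m * (m + 1) : Nat) : Int) := by push_cast; ring
        rw [hcast, show (2 : Int) = ((2 : Nat) : Int) from rfl, PySem.Int.floordiv_natCast]
        omega
      rw [hf, pv_map_add_pyRange]
    rw [hblock, ← PySem.List.pyRange_one_append 0 ((pvPairs (m : Int)).length) _ (by positivity) (by omega)]
    congr 1
    rw [List.length_append, List.length_map, PySem.List.length_pyRange_one]
    push_cast
    omega

lemma pvIdx_pairs (n : Int) :
    (pvPairs n).map pvIdx = PySem.List.pyRange 0 ((pvPairs n).length) 1 := by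
  by_cases h : n ≤ 0
  · simp [pvPairs, PySem.List.pyRange_one_eq_nil h]
  · have : n = (n.toNat : Int) := by omega
    rw [this]; exact pvIdx_pairs_nat n.toNat

-- a list whose f-image is a contiguous increasing integer range: filter (f · ≤ t) is a prefix
lemma pv_filter_eq_take {α : Type} (f : α → Int) :
    ∀ (xs : List α) (a t : Int),
      xs.map f = PySem.List.pyRange a (a + xs.length) 1 →
      xs.filter (fun q => decide (f q ≤ t)) = xs.take (t + 1 - a).toNat := by
  intro xs
  induction xs with
  | nil => simp
  | cons x xs ih =>
    intro a t h
    rw [PySem.List.pyRange_one_cons (by simp only [List.length_cons]; push_cast; omega)] at h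
    simp only [List.map_cons, List.cons.injEq] at h
    obtain ⟨hx, hxs⟩ := h
    have hxs' : xs.map f = PySem.List.pyRange (a + 1) ((a + 1) + xs.length) 1 := by
      rw [hxs]; congr 1; simp only [List.length_cons]; push_cast; omega
    by_cases hat : f x ≤ t
    · have h1 : (t + 1 - a).toNat = (t + 1 - (a + 1)).toNat + 1 := by omega
      simp only [List.filter_cons, decide_eq_true hat, if_true, h1, List.take_succ_cons]
      rw [ih (a + 1) t hxs']
    · have h0 : (t + 1 - a).toNat = 0 := by omega
      simp only [List.filter_cons, h0, List.take_zero]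
      rw [if_neg (by simpa using hat)]
      rw [List.filter_eq_nil_iff]
      intro q hq
      have : f q ∈ xs.map f := List.mem_map_of_mem hq
      rw [hxs'] at this
      rw [PySem.List.mem_pyRange_one] at this
      simp only [decide_eq_true_eq]
      omega

-- the common normal form of both programs
def pvSpecForm (n : Int) : List (Int × Int × Int × Int) :=
  (PySem.List.enumerate (pvPairs n) 0).flatMap (fun tp =>
    ((pvPairs n).take (tp.1 + 1).toNat).map (fun kl => (tp.2.1, tp.2.2, kl.1, kl.2)))

-- prefix read by pyGetD over a range is `take`
lemma pv_map_getD_take {α : Type} (xs : List α) (d : α) (t : Nat) (h : t ≤ xs.length) :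
    (PySem.List.pyRange 0 (t : Int) 1).map (fun i => PySem.List.pyGetD xs i d) = xs.take t := by
  apply List.ext_getElem
  · simp [PySem.List.length_pyRange_one]; omega
  · intro i h1 h2
    simp only [List.getElem_map, PySem.List.getElem_pyRange_one, List.getElem_take]
    have hi : i < t := by simpa [PySem.List.length_pyRange_one] using h1
    rw [show (0 : Int) + ((i : Nat) : Int) = ((i : Nat) : Int) by ring]
    rw [PySem.List.pyGetD_natCast]
    exact List.getD_eq_getElem _ _ (by omega)

lemma pvB_eq (n : Int) : get_unique_quartets_alt n = pvSpecForm n := by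
  unfold get_unique_quartets_alt pvSpecForm
  rw [PySem.List.foldl_congr_mem _ _ (fun (quartets : List (Int × Int × Int × Int)) tp =>
        quartets ++ ((pvPairs n).take (tp.1 + 1).toNat).map (fun kl => (tp.2.1, tp.2.2, kl.1, kl.2))) _ ?_]
  · rw [PySem.List.foldl_append_eq_flatMap]
    simp
  · intro acc tp htp
    rw [PySem.List.mem_enumerate_iff] at htp
    obtain ⟨k, hk, rfl⟩ := htp
    simp only [zero_add]
    rw [PySem.List.foldl_congr_mem _ _ (fun (quartets : List (Int × Int × Int × Int)) idx2 =>
          quartets ++ [((pvPairs n)[k].1, (pvPairs n)[k].2,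
            (PySem.List.pyGetD (pvPairs n) idx2 ((0:Int),(0:Int))).1,
            (PySem.List.pyGetD (pvPairs n) idx2 ((0:Int),(0:Int))).2)]) _ ?_]
    · rw [PySem.List.foldl_append_singleton_eq_map]
      congr 1
      have ht : ((k : Int) + 1) = (((k + 1 : Nat) : Int)) := by push_cast; ring
      rw [ht, Int.toNat_natCast]
      calc (PySem.List.pyRange 0 ((k + 1 : Nat) : Int) 1).map
              (fun idx2 => ((pvPairs n)[k].1, (pvPairs n)[k].2,
                (PySem.List.pyGetD (pvPairs n) idx2 ((0:Int),(0:Int))).1,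
                (PySem.List.pyGetD (pvPairs n) idx2 ((0:Int),(0:Int))).2))
          = ((PySem.List.pyRange 0 ((k + 1 : Nat) : Int) 1).map
              (fun idx2 => PySem.List.pyGetD (pvPairs n) idx2 ((0:Int),(0:Int)))).map
              (fun kl => ((pvPairs n)[k].1, (pvPairs n)[k].2, kl.1, kl.2)) := by
            rw [List.map_map]; rfl
        _ = ((pvPairs n).take (k + 1)).map
              (fun kl => ((pvPairs n)[k].1, (pvPairs n)[k].2, kl.1, kl.2)) := by
            rw [pv_map_getD_take (pvPairs n) ((0:Int),(0:Int)) (k + 1) (by omega)]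
    · intro acc2 idx2 hidx2
      rw [PySem.List.mem_pyRange_one] at hidx2
      have hlt : idx2 < ((pvPairs n).length : Int) := by
        have : (k : Int) < ((pvPairs n).length : Int) := by exact_mod_cast hk
        omega
      rw [PySem.List.pyGet?_eq_some_getElem _ (by omega) hlt]
      rw [show (pvPairs n)[idx2.toNat]'(by omega)
            = PySem.List.pyGetD (pvPairs n) idx2 ((0:Int),(0:Int)) from
          (PySem.List.pyGetD_eq_getElem _ _ (by omega) hlt).symm]

-- A collects, for each pair p, all pairs q of pvPairs with pvIdx q ≤ pvIdx p, in order
lemma pvA_flat (n : Int) : get_unique_quartets n =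
    (pvPairs n).flatMap (fun p =>
      ((pvPairs n).filter (fun q => decide (pvIdx q ≤ pvIdx p))).map (fun q => (p.1, p.2, q.1, q.2))) := by
  unfold get_unique_quartets
  simp only [PySem.List.foldl_append_ite, PySem.List.foldl_append_eq_flatMap, List.nil_append]
  unfold pvPairs pvIdx
  simp only [List.flatMap_assoc, List.flatMap_map, List.filter_flatMap, List.filter_map,
    List.map_flatMap, List.map_map]
  simp [Function.comp_def, ge_iff_le]

lemma pvA_eq (n : Int) : get_unique_quartets n = pvSpecForm n := by
  rw [pvA_flat]
  unfold pvSpecForm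
  have houter : ∀ (H : (Int × Int) → List (Int × Int × Int × Int)),
      (pvPairs n).flatMap H = (PySem.List.enumerate (pvPairs n) 0).flatMap (fun tp => H tp.2) := by
    intro H
    conv_lhs => rw [show pvPairs n = (PySem.List.enumerate (pvPairs n) 0).map (fun x => x.2) from
      (PySem.List.map_snd_enumerate _ _).symm]
    rw [List.flatMap_map]
  rw [houter]
  apply List.flatMap_congr
  intro tp htp
  rw [PySem.List.mem_enumerate_iff] at htp
  obtain ⟨k, hk, rfl⟩ := htp
  simp only [zero_add]
  have hidx : pvIdx ((pvPairs n)[k]) = (k : Int) := by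
    have h1 := pvIdx_pairs n
    have h2 := congrArg (fun l => l[k]?) h1
    simp only [List.getElem?_map, PySem.List.getElem?_pyRange_one] at h2
    rw [List.getElem?_eq_getElem hk] at h2
    rw [if_pos (by omega)] at h2
    simp only [Option.map_some, Option.some.injEq] at h2
    omega
  rw [hidx]
  rw [pv_filter_eq_take pvIdx (pvPairs n) 0 (k : Int)
    (by rw [pvIdx_pairs n]; congr 1; omega)]
  congr 1

-- ===== VERDICT (by name: the statement is the Claim_ definition above) =====
theorem get_unique_quartets_spec : Claim_equal_get_unique_quartets := by
  intro n _
  unfold Spec_get_unique_quartets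
  rw [pvA_eq, pvB_eq]
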